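-- pv_equiv track=rewrite | github.com/mncmncmnc/ny-phil | scripts/build_aggregates.py | build_works_by_composer
-- ===== SOURCE A (Python) =====
-- from collections import defaultdict
--
-- def norm_space(s):
--     if s is None:
--         return ""
--     if not isinstance(s, str):
--         return ""
--     return " ".join(s.split())
--
-- def build_works_by_composer(programs):
--     # preserve first-seen title order per composer (program list order)
--     order = defaultdict(list)
--     seen = defaultdict(set)
--     for program in programs:
--         for work in program["works"]:
--             if work.get("interval"):
--                 continue
--             composer = norm_space(work.get("composerName"))
--             title = norm_space(work.get("workTitle"))
--             if not composer or not title: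
--                 continue
--             if title not in seen[composer]:
--                 seen[composer].add(title)
--                 order[composer].append(title)
--     return {c: order[c] for c in sorted(order)}
-- ===== SOURCE B (Python) =====
-- def norm_space(s):
--     if s is None:
--         return ""
--     if not isinstance(s, str):
--         return ""
--     return " ".join(s.split())
--
-- def build_works_by_composer(programs):
--     # flatten to a global (composer, title) pair list, then group by
--     # per-composer filtering — no dict is maintained during the scan
--     pairs = []
--     for program in programs:
--         for work in program["works"]:
--             if work.get("interval"):
--                 continue
--             c = norm_space(work.get("composerName"))
--             t = norm_space(work.get("workTitle"))
--             if c and t: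
--                 pairs.append((c, t))
--     composers = sorted({c for c, _ in pairs})
--     return {c: list(dict.fromkeys(t for cc, t in pairs if cc == c))
--             for c in composers}
-- ===== Notes on version B (the rewrite author's own statement) =====
-- stated objective: alternative
-- what changed: B flattens all programs into one global (composer, title) pair list with no dict or seen-set during the scan, then groups by per-composer filtering of that list (sorted distinct composers, dict.fromkeys dedup), instead of A's single-pass hash grouping with inline set dedup.
import Mathlib
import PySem

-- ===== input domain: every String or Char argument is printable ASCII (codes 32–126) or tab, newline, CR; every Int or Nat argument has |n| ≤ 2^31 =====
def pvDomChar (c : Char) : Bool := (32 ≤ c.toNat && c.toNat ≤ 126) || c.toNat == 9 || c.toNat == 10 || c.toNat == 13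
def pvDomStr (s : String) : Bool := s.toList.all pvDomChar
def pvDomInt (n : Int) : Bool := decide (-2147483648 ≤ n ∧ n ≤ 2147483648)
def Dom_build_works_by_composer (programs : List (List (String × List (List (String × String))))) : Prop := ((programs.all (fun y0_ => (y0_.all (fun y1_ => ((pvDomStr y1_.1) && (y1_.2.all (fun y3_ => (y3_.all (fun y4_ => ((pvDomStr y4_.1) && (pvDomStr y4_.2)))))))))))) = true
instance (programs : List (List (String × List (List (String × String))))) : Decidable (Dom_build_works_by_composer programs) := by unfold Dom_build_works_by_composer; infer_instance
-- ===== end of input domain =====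

-- B flattens everything into one global (composer, title) pair list — no dict or
-- seen-set during the scan — then groups by per-composer filtering of that list
-- (objective: alternative algorithm, sort-then-filter grouping instead of hash grouping).

-- ===== PORT A =====

-- shared helper: Python dict lookup d.get(k) on an association list (first match)
def pvLookup {α : Type} (d : List (String × α)) (k : String) : Option α :=
  (d.find? (fun kv => kv.1 == k)).map (·.2)

-- norm_space(o) on an optional string: None → "", else " ".join(s.split())
def pvNormSpace (o : Option String) : String :=
  match o with
  | none => ""
  | some s => PySem.Str.join " " (PySem.Str.split₀ s)

-- Python truthiness of work.get("interval") : Optional[str]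
def pvTruthy (o : Option String) : Bool :=
  match o with
  | none => false
  | some s => !(s == "")

def build_works_by_composer (programs : List (List (String × List (List (String × String))))) : List (String × List String) :=
  -- order, seen as dicts; program["works"] raises KeyError when absent (excluded by Pre_)
  let st := programs.foldl (fun st program =>
    ((pvLookup program "works").getD []).foldl (fun st work =>
      if pvTruthy (pvLookup work "interval") then st
      else
        let composer := pvNormSpace (pvLookup work "composerName")
        let title := pvNormSpace (pvLookup work "workTitle")
        if composer = "" ∨ title = "" then st
        else
          let s := st.2.getD composer PySem.Set.empty
          if title ∈ s then st
          else (st.1.modify composer [] (· ++ [title]),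
                st.2.insert composer (PySem.Set.add s title))) st)
    ((PySem.Dict.empty : PySem.Dict String (List String)),
     (PySem.Dict.empty : PySem.Dict String (PySem.Set String)))
  -- {c: order[c] for c in sorted(order)}
  ((PySem.List.sorted st.1.keys (fun c => c) false).foldl
      (fun r c => r.insert c (st.1.getD c [])) PySem.Dict.empty).items

-- ===== PORT B =====
def build_works_by_composer_alt (programs : List (List (String × List (List (String × String))))) : List (String × List String) :=
  -- flatten pass: pairs.append((c, t)) for every valid work
  let pairs := programs.foldl (fun acc program =>
    ((pvLookup program "works").getD []).foldl (fun acc work =>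
      if pvTruthy (pvLookup work "interval") then acc
      else
        let c := pvNormSpace (pvLookup work "composerName")
        let t := pvNormSpace (pvLookup work "workTitle")
        if c ≠ "" ∧ t ≠ "" then acc ++ [(c, t)] else acc) acc) []
  -- composers = sorted({c for c, _ in pairs})
  let composers := PySem.List.sorted (PySem.Set.ofList (pairs.map (·.1))) (fun c => c) false
  -- {c: list(dict.fromkeys(t for cc, t in pairs if cc == c)) for c in composers}
  (composers.foldl (fun r c =>
      r.insert c (PySem.List.dedup ((pairs.filter (fun p => p.1 == c)).map (·.2))))
    PySem.Dict.empty).items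

-- ===== PRECONDITION & SPEC =====
-- Pre_ excludes inputs where some program lacks the "works" key: there Python A raises KeyError.
def Pre_build_works_by_composer (programs : List (List (String × List (List (String × String))))) : Prop :=
  (programs.all (fun program => program.any (fun kv => kv.1 == "works"))) = true
instance (programs : List (List (String × List (List (String × String))))) : Decidable (Pre_build_works_by_composer programs) := by unfold Pre_build_works_by_composer; infer_instance

def pvWitness_build_works_by_composer : (List (List (String × List (List (String × String))))) :=
  [[("works", [[("composerName", "Bach"), ("workTitle", "Mass in B minor")],
               [("composerName", "Bach"), ("workTitle", "Mass in B minor")]])]]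

def Spec_build_works_by_composer (programs : List (List (String × List (List (String × String))))) (out : List (String × List String)) : Prop := out = build_works_by_composer_alt programs
instance (programs : List (List (String × List (List (String × String))))) (out : List (String × List String)) : Decidable (Spec_build_works_by_composer programs out) := by unfold Spec_build_works_by_composer; infer_instance

-- ===== CLAIM (what is proved, stated in full; the proofs are below) =====
def Claim_equal_build_works_by_composer : Prop := ∀ (programs : List (List (String × List (List (String × String))))), Dom_build_works_by_composer programs → Pre_build_works_by_composer programs → Spec_build_works_by_composer programs (build_works_by_composer programs)

-- ===== LEMMAS AND PROOFS =====

-- the stream of valid (composer, title) pairs, shared by both proofs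
def pvExtract (work : List (String × String)) : Option (String × String) :=
  if pvTruthy (pvLookup work "interval") then none
  else
    let c := pvNormSpace (pvLookup work "composerName")
    let t := pvNormSpace (pvLookup work "workTitle")
    if c = "" ∨ t = "" then none else some (c, t)

def pvPairs (programs : List (List (String × List (List (String × String))))) : List (String × String) :=
  programs.flatMap (fun program => ((pvLookup program "works").getD []).filterMap pvExtract)

def pvStepA (st : PySem.Dict String (List String) × PySem.Dict String (PySem.Set String))
    (p : String × String) : PySem.Dict String (List String) × PySem.Dict String (PySem.Set String) :=
  let s := st.2.getD p.1 PySem.Set.empty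
  if p.2 ∈ s then st
  else (st.1.modify p.1 [] (· ++ [p.2]), st.2.insert p.1 (PySem.Set.add s p.2))

-- one step of A on an optional extracted pair
def pvStepOptA (st : PySem.Dict String (List String) × PySem.Dict String (PySem.Set String))
    (work : List (String × String)) := match pvExtract work with | none => st | some p => pvStepA st p

theorem foldl_filterMapA (l : List (List (String × String)))
    (init : PySem.Dict String (List String) × PySem.Dict String (PySem.Set String)) :
    (l.filterMap pvExtract).foldl pvStepA init = l.foldl pvStepOptA init := by
  induction l generalizing init with
  | nil => rfl
  | cons x xs ih =>
    rw [List.filterMap_cons]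
    cases h : pvExtract x <;> simp [h, ih, pvStepOptA]

theorem innerA_eq (works : List (List (String × String)))
    (st : PySem.Dict String (List String) × PySem.Dict String (PySem.Set String)) :
    works.foldl (fun st work =>
      if pvTruthy (pvLookup work "interval") then st
      else
        let composer := pvNormSpace (pvLookup work "composerName")
        let title := pvNormSpace (pvLookup work "workTitle")
        if composer = "" ∨ title = "" then st
        else
          let s := st.2.getD composer PySem.Set.empty
          if title ∈ s then st
          else (st.1.modify composer [] (· ++ [title]),
                st.2.insert composer (PySem.Set.add s title))) st
    = (works.filterMap pvExtract).foldl pvStepA st := by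
  rw [foldl_filterMapA]
  have hf : (fun (st : PySem.Dict String (List String) × PySem.Dict String (PySem.Set String)) work =>
      if pvTruthy (pvLookup work "interval") then st
      else
        let composer := pvNormSpace (pvLookup work "composerName")
        let title := pvNormSpace (pvLookup work "workTitle")
        if composer = "" ∨ title = "" then st
        else
          let s := st.2.getD composer PySem.Set.empty
          if title ∈ s then st
          else (st.1.modify composer [] (· ++ [title]),
                st.2.insert composer (PySem.Set.add s title)))
      = pvStepOptA := by
    funext st w
    simp only [pvStepOptA, pvExtract, pvStepA]
    split_ifs with h1 h2 h3
    · rfl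
    · rfl
    · simp only [PySem.Set.empty] at h3
      simp [h3]
    · simp only [PySem.Set.empty] at h3
      simp [h3]
  rw [hf]

theorem outerA_eq (programs : List (List (String × List (List (String × String)))))
    (st : PySem.Dict String (List String) × PySem.Dict String (PySem.Set String)) :
    programs.foldl (fun st program =>
      ((pvLookup program "works").getD []).foldl (fun st work =>
        if pvTruthy (pvLookup work "interval") then st
        else
          let composer := pvNormSpace (pvLookup work "composerName")
          let title := pvNormSpace (pvLookup work "workTitle")
          if composer = "" ∨ title = "" then st
          else
            let s := st.2.getD composer PySem.Set.empty
            if title ∈ s then st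
            else (st.1.modify composer [] (· ++ [title]),
                  st.2.insert composer (PySem.Set.add s title))) st) st
    = (pvPairs programs).foldl pvStepA st := by
  induction programs generalizing st with
  | nil => rfl
  | cons p ps ih =>
    rw [List.foldl_cons, ih,
        show pvPairs (p :: ps) = (((pvLookup p "works").getD []).filterMap pvExtract) ++ pvPairs ps
          from by simp [pvPairs],
        List.foldl_append, innerA_eq]

-- B's gather loop appends exactly the extracted pairs
theorem innerGather_eq (works : List (List (String × String))) (acc : List (String × String)) :
    works.foldl (fun acc work =>
      if pvTruthy (pvLookup work "interval") then acc
      else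
        let c := pvNormSpace (pvLookup work "composerName")
        let t := pvNormSpace (pvLookup work "workTitle")
        if c ≠ "" ∧ t ≠ "" then acc ++ [(c, t)] else acc) acc
    = acc ++ works.filterMap pvExtract := by
  induction works generalizing acc with
  | nil => simp
  | cons w ws ih =>
    rw [List.foldl_cons, List.filterMap_cons]
    have hstep : (if pvTruthy (pvLookup w "interval") then acc
        else
          let c := pvNormSpace (pvLookup w "composerName")
          let t := pvNormSpace (pvLookup w "workTitle")
          if c ≠ "" ∧ t ≠ "" then acc ++ [(c, t)] else acc)
        = acc ++ (pvExtract w).toList := by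
      simp only [pvExtract]
      split_ifs with h1 h2 h3 <;> simp <;> tauto
    rw [hstep]
    cases h : pvExtract w <;> simp [ih]

theorem outerGather_eq (programs : List (List (String × List (List (String × String)))))
    (acc : List (String × String)) :
    programs.foldl (fun acc program =>
      ((pvLookup program "works").getD []).foldl (fun acc work =>
        if pvTruthy (pvLookup work "interval") then acc
        else
          let c := pvNormSpace (pvLookup work "composerName")
          let t := pvNormSpace (pvLookup work "workTitle")
          if c ≠ "" ∧ t ≠ "" then acc ++ [(c, t)] else acc) acc) acc
    = acc ++ pvPairs programs := by
  induction programs generalizing acc with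
  | nil => simp [pvPairs]
  | cons p ps ih =>
    rw [List.foldl_cons, innerGather_eq, ih,
        show pvPairs (p :: ps) = (((pvLookup p "works").getD []).filterMap pvExtract) ++ pvPairs ps
          from by simp [pvPairs],
        List.append_assoc]

-- A's loop invariant
theorem foldA_spec (L : List (String × String))
    (o : PySem.Dict String (List String)) (s : PySem.Dict String (PySem.Set String))
    (hsync : ∀ c t, t ∈ s.getD c PySem.Set.empty ↔ t ∈ o.getD c []) :
    (∀ c, (L.foldl pvStepA (o, s)).1.getD c []
        = PySem.Set.update (o.getD c []) ((L.filter (fun p => p.1 == c)).map (·.2)))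
    ∧ (L.foldl pvStepA (o, s)).1.keys = PySem.Set.update o.keys (L.map (·.1))
    ∧ (∀ c t, t ∈ (L.foldl pvStepA (o, s)).2.getD c PySem.Set.empty ↔ t ∈ (L.foldl pvStepA (o, s)).1.getD c []) := by
  induction L generalizing o s with
  | nil =>
    exact ⟨fun c => by simp [PySem.Set.update_nil], by simp [PySem.Set.update_nil], hsync⟩
  | cons p L ih =>
    obtain ⟨c0, t0⟩ := p
    rw [List.foldl_cons]
    by_cases hmem : t0 ∈ s.getD c0 PySem.Set.empty
    · have hc0keys : c0 ∈ o.keys := by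
        have hmo : t0 ∈ o.getD c0 [] := (hsync c0 t0).mp hmem
        by_contra hno
        have hcf : o.contains c0 = false := by
          cases hc : o.contains c0
          · rfl
          · exact absurd ((PySem.Dict.contains_iff_mem_keys _ _).mp hc) hno
        rw [PySem.Dict.getD_of_not_contains _ _ hcf] at hmo
        simp at hmo
      have hstep : pvStepA (o, s) (c0, t0) = (o, s) := by
        simp only [pvStepA]
        exact if_pos hmem
      rw [hstep]
      obtain ⟨ih1, ih2, ih3⟩ := ih o s hsync
      refine ⟨fun c => ?_, ?_, ih3⟩
      · rw [ih1 c]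
        by_cases hc : c0 = c
        · subst hc
          have ht0 : t0 ∈ o.getD c0 [] := (hsync c0 t0).mp hmem
          simp [PySem.Set.update_cons, PySem.Set.add_of_mem ht0]
        · simp [hc]
      · rw [ih2]
        simp [PySem.Set.update_cons, PySem.Set.add_of_mem hc0keys]
    · have hstep : pvStepA (o, s) (c0, t0)
          = (o.modify c0 [] (· ++ [t0]), s.insert c0 (PySem.Set.add (s.getD c0 PySem.Set.empty) t0)) := by
        simp only [pvStepA]
        exact if_neg hmem
      rw [hstep]
      have hsync' : ∀ c t,
          t ∈ (s.insert c0 (PySem.Set.add (s.getD c0 PySem.Set.empty) t0)).getD c PySem.Set.empty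
          ↔ t ∈ (o.modify c0 [] (· ++ [t0])).getD c [] := by
        intro c t
        by_cases hc : c = c0
        · subst hc
          rw [PySem.Dict.getD_insert_self, PySem.Dict.getD_modify_self, PySem.Set.mem_add]
          have h' := hsync c t
          simp only [PySem.Set.empty] at h' ⊢
          simp [h']
        · rw [PySem.Dict.getD_insert_of_ne _ _ _ hc, PySem.Dict.getD_modify_of_ne _ _ _ hc]
          exact hsync c t
      obtain ⟨ih1, ih2, ih3⟩ := ih _ _ hsync'
      refine ⟨fun c => ?_, ?_, ih3⟩
      · rw [ih1 c]
        by_cases hc : c0 = c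
        · subst hc
          have ht0 : t0 ∉ o.getD c0 [] := fun h => hmem ((hsync c0 t0).mpr h)
          rw [PySem.Dict.getD_modify_self]
          simp [PySem.Set.update_cons, PySem.Set.add_of_not_mem ht0]
        · have hc' : c ≠ c0 := fun h => hc h.symm
          rw [PySem.Dict.getD_modify_of_ne _ _ _ hc']
          simp [hc]
      · rw [ih2, PySem.Dict.keys_modify]
        by_cases hc : o.contains c0 = true
        · rw [PySem.Dict.keys_insert_of_contains _ _ hc]
          simp [PySem.Set.update_cons,
            PySem.Set.add_of_mem ((PySem.Dict.contains_iff_mem_keys _ _).mp hc)]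
        · have hcf : o.contains c0 = false := by
            cases h : o.contains c0
            · rfl
            · exact absurd h hc
          rw [PySem.Dict.keys_insert_of_not_contains _ _ hcf]
          have hnk : c0 ∉ o.keys := fun h =>
            hc ((PySem.Dict.contains_iff_mem_keys _ _).mpr h)
          simp [PySem.Set.update_cons, PySem.Set.add_of_not_mem hnk]

theorem pairs_result_A (programs : List (List (String × List (List (String × String))))) :
    build_works_by_composer programs
    = (PySem.List.sorted (PySem.Set.ofList ((pvPairs programs).map (·.1))) (fun c => c) false).map
        (fun c => (c, PySem.Set.ofList (((pvPairs programs).filter (fun p => p.1 == c)).map (·.2)))) := by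
  simp only [build_works_by_composer]
  rw [outerA_eq]
  obtain ⟨hA1, hA2, _⟩ := foldA_spec (pvPairs programs) PySem.Dict.empty PySem.Dict.empty
    (by intro c t; simp)
  have hAk : ((pvPairs programs).foldl pvStepA (PySem.Dict.empty, PySem.Dict.empty)).1.keys
      = PySem.Set.ofList ((pvPairs programs).map (·.1)) := by
    rw [hA2, PySem.Dict.keys_empty]
    exact PySem.Set.update_empty _
  rw [hAk]
  have hnd : ((PySem.List.sorted (PySem.Set.ofList ((pvPairs programs).map (·.1))) (fun c => c) false).map
      (fun c => c)).Nodup := by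
    simp only [List.map_id']
    exact ((PySem.List.sorted_perm _ _ _).nodup_iff).mpr (PySem.Set.nodup_ofList _)
  rw [PySem.Dict.items_foldl_insert_fresh _ _ _ _ (fun a _ => rfl) hnd]
  rw [show (PySem.Dict.empty : PySem.Dict String (List String)).items = [] from rfl, List.nil_append]
  apply List.map_congr_left
  intro c _
  rw [hA1 c, PySem.Dict.getD_empty]
  exact congrArg _ (PySem.Set.update_nil_left _)

theorem pairs_result_B (programs : List (List (String × List (List (String × String))))) :
    build_works_by_composer_alt programs
    = (PySem.List.sorted (PySem.Set.ofList ((pvPairs programs).map (·.1))) (fun c => c) false).map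
        (fun c => (c, PySem.Set.ofList (((pvPairs programs).filter (fun p => p.1 == c)).map (·.2)))) := by
  simp only [build_works_by_composer_alt]
  rw [show (programs.foldl (fun acc program =>
      ((pvLookup program "works").getD []).foldl (fun acc work =>
        if pvTruthy (pvLookup work "interval") then acc
        else
          let c := pvNormSpace (pvLookup work "composerName")
          let t := pvNormSpace (pvLookup work "workTitle")
          if c ≠ "" ∧ t ≠ "" then acc ++ [(c, t)] else acc) acc) [])
      = pvPairs programs from by rw [outerGather_eq]; simp]
  have hnd : ((PySem.List.sorted (PySem.Set.ofList ((pvPairs programs).map (·.1))) (fun c => c) false).map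
      (fun c => c)).Nodup := by
    simp only [List.map_id']
    exact ((PySem.List.sorted_perm _ _ _).nodup_iff).mpr (PySem.Set.nodup_ofList _)
  rw [PySem.Dict.items_foldl_insert_fresh _ _ _ _ (fun a _ => rfl) hnd]
  rw [show (PySem.Dict.empty : PySem.Dict String (List String)).items = [] from rfl, List.nil_append]
  simp only [PySem.List.dedup_eq_ofList]

-- ===== VERDICT =====
theorem build_works_by_composer_spec : Claim_equal_build_works_by_composer := by
  intro programs _ _
  unfold Spec_build_works_by_composer
  rw [pairs_result_A, pairs_result_B]
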